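-- pv_equiv track=rewrite | github.com/Jonathangadeaharder/SpeechToText | src/overlays/help_overlay.py | _parse_help_text
-- ===== SOURCE A (Python) =====
-- def _parse_help_text(help_text: str) -> list:
--     """
--     Parse help text into sections.
--
--     Args:
--         help_text: Raw help text
--
--     Returns:
--         List of (section_title, section_content) tuples
--     """
--     sections = []
--     current_section = None
--     current_content: list[str] = []
--
--     for line in help_text.split("\n"):
--         # Check if line is a section header (all caps, ends with colon)
--         if line.strip() and line.strip().isupper() and ":" in line:
--             # Save previous section
--             if current_section is not None:
--                 sections.append((current_section, "\n".join(current_content)))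
--
--             # Start new section
--             current_section = line.strip()
--             current_content = []
--
--         elif line.strip():
--             current_content.append(line)
--
--     # Save last section
--     if current_section is not None:
--         sections.append((current_section, "\n".join(current_content)))
--     elif current_content:
--         # No sections, just content
--         sections.append(("", "\n".join(current_content)))
--
--     return sections
-- ===== SOURCE B (Python) =====
-- def _parse_help_text(help_text: str) -> list:
--     """Span-based re-implementation: find the first header, then repeatedly
--     slice off one header and the body lines up to the next header."""
--     lines = help_text.split("\n")
--
--     def is_header(ln):
--         s = ln.strip()
--         return bool(s) and s.isupper() and ":" in ln
--
--     # skip everything before the first header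
--     i = 0
--     while i < len(lines) and not is_header(lines[i]):
--         i += 1
--
--     if i == len(lines):
--         # no headers at all: one untitled section from the non-empty lines
--         content = [ln for ln in lines if ln.strip()]
--         return [("", "\n".join(content))] if content else []
--
--     sections = []
--     rest = lines[i:]
--     while rest:
--         header, rest = rest[0], rest[1:]
--         j = 0
--         while j < len(rest) and not is_header(rest[j]):
--             j += 1
--         body = [ln for ln in rest[:j] if ln.strip()]
--         sections.append((header.strip(), "\n".join(body)))
--         rest = rest[j:]
--     return sections
-- ===== Notes on version B (the rewrite author's own statement) =====
-- stated objective: alternative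
-- what changed: Replaces A's single fold carrying (sections, current_section, current_content) accumulator state by a span-based decomposition: skip lines before the first header, then repeatedly slice off one header and the body lines up to the next header, emitting each section directly.
import Mathlib
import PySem

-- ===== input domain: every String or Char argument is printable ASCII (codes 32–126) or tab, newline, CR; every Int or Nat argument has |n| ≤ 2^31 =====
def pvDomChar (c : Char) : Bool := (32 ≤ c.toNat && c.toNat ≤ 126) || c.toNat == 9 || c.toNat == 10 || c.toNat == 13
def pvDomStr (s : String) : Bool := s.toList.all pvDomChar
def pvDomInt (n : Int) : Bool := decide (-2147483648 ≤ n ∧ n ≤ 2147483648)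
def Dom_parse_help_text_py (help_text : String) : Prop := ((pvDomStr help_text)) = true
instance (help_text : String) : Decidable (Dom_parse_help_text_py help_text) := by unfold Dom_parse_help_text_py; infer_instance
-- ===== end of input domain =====

-- B replaces A's single accumulator-state fold by a span-based recursion (skip to the first
-- header, then repeatedly slice off one header and its body up to the next header); objective: alternative.


-- shared helpers: the header test both Pythons spell identically
-- Python str.isupper(): some cased char and no lowercase char — exact on the ASCII domain, where cased chars are exactly the letters
def pvStrIsupper (cs : List Char) : Bool :=
  cs.any (fun c => PySem.Chars.isalpha c) && cs.all (fun c => !PySem.Chars.islower c)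

-- `line.strip() and line.strip().isupper() and ":" in line`
def pvIsHeader (l : List Char) : Bool :=
  !(PySem.Chars.strip l).isEmpty && pvStrIsupper (PySem.Chars.strip l) && PySem.Chars.isIn [':'] l

-- ===== PORT A =====
-- loop state: (sections, current_section, current_content)
def pvAStep (st : List (String × String) × Option (List Char) × List (List Char))
    (line : List Char) : List (String × String) × Option (List Char) × List (List Char) :=
  if pvIsHeader line then
    ((match st.2.1 with
      | some t => st.1 ++ [(String.ofList t, String.ofList (PySem.Chars.join ['\n'] st.2.2))]
      | none => st.1), some (PySem.Chars.strip line), [])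
  else if !(PySem.Chars.strip line).isEmpty then
    (st.1, st.2.1, st.2.2 ++ [line])
  else st

def pvAFin (st : List (String × String) × Option (List Char) × List (List Char)) :
    List (String × String) :=
  match st.2.1 with
  | some t => st.1 ++ [(String.ofList t, String.ofList (PySem.Chars.join ['\n'] st.2.2))]
  | none => if !st.2.2.isEmpty then st.1 ++ [("", String.ofList (PySem.Chars.join ['\n'] st.2.2))] else st.1

def parse_help_text_py (help_text : String) : List (String × String) :=
  pvAFin ((PySem.Chars.splitOn help_text.toList ['\n']).foldl pvAStep ([], none, []))

-- ===== PORT B =====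
-- one header plus its body (the non-empty lines before the next header), then recurse on the rest
def pvGo : List (List Char) → List (String × String)
  | [] => []
  | h :: rest =>
      (String.ofList (PySem.Chars.strip h),
       String.ofList (PySem.Chars.join ['\n']
         ((rest.takeWhile (fun l => !pvIsHeader l)).filter (fun l => !(PySem.Chars.strip l).isEmpty))))
      :: pvGo (rest.dropWhile (fun l => !pvIsHeader l))
termination_by ls => ls.length
decreasing_by
  simp only [List.length_cons]
  exact Nat.lt_succ_of_le (List.length_dropWhile_le _ _)

def parse_help_text_py_alt (help_text : String) : List (String × String) :=
  let lines := PySem.Chars.splitOn help_text.toList ['\n']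
  let rest := lines.dropWhile (fun l => !pvIsHeader l)
  if rest.isEmpty then
    let content := lines.filter (fun l => !(PySem.Chars.strip l).isEmpty)
    if content.isEmpty then [] else [("", String.ofList (PySem.Chars.join ['\n'] content))]
  else pvGo rest

-- ===== PRECONDITION & SPEC =====
def Spec_parse_help_text_py (help_text : String) (out : List (String × String)) : Prop := out = parse_help_text_py_alt help_text
instance (help_text : String) (out : List (String × String)) : Decidable (Spec_parse_help_text_py help_text out) := by unfold Spec_parse_help_text_py; infer_instance

-- ===== CLAIM (what is proved, stated in full; the proofs are below) =====
def Claim_equal_parse_help_text_py : Prop := ∀ (help_text : String), Dom_parse_help_text_py help_text → Spec_parse_help_text_py help_text (parse_help_text_py help_text)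

-- ===== LEMMAS AND PROOFS =====

-- A's fold from a `some`-section state equals the current pair followed by B's span recursion
theorem pvA_some (lines : List (List Char)) :
    ∀ (secs : List (String × String)) (t : List Char) (c : List (List Char)),
    pvAFin (lines.foldl pvAStep (secs, some t, c)) =
      secs ++ (String.ofList t,
        String.ofList (PySem.Chars.join ['\n']
          (c ++ (lines.takeWhile (fun l => !pvIsHeader l)).filter (fun l => !(PySem.Chars.strip l).isEmpty))))
        :: pvGo (lines.dropWhile (fun l => !pvIsHeader l)) := by
  induction lines with
  | nil => intro secs t c; simp [pvAFin, pvGo]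
  | cons l ls ih =>
      intro secs t c
      by_cases hh : pvIsHeader l = true
      · simp [List.foldl_cons, pvAStep, hh, ih, pvGo]
      · by_cases hne : (PySem.Chars.strip l).isEmpty = false
        · simp [List.foldl_cons, pvAStep, hh, hne, ih]
        · simp at hne
          simp [List.foldl_cons, pvAStep, hh, hne, ih]

-- A's fold from a `none`-section state: content before the first header is discarded
theorem pvA_none (lines : List (List Char)) :
    ∀ (secs : List (String × String)) (c : List (List Char)),
    pvAFin (lines.foldl pvAStep (secs, none, c)) =
      if (lines.dropWhile (fun l => !pvIsHeader l)).isEmpty then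
        (if (c ++ lines.filter (fun l => !(PySem.Chars.strip l).isEmpty)).isEmpty then secs
         else secs ++ [("", String.ofList (PySem.Chars.join ['\n']
                (c ++ lines.filter (fun l => !(PySem.Chars.strip l).isEmpty))))])
      else secs ++ pvGo (lines.dropWhile (fun l => !pvIsHeader l)) := by
  induction lines with
  | nil =>
      intro secs c
      by_cases hc : c.isEmpty <;> simp_all [pvAFin]
  | cons l ls ih =>
      intro secs c
      by_cases hh : pvIsHeader l = true
      · simp [List.foldl_cons, pvAStep, hh, pvA_some, pvGo]
      · by_cases hne : (PySem.Chars.strip l).isEmpty = false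
        · simp [List.foldl_cons, pvAStep, hh, hne, ih]
        · simp at hne
          simp [List.foldl_cons, pvAStep, hh, hne, ih]

-- ===== VERDICT (by name: the statement is the Claim_ definition above) =====
theorem parse_help_text_py_spec : Claim_equal_parse_help_text_py := by
  intro help_text _
  unfold Spec_parse_help_text_py parse_help_text_py parse_help_text_py_alt
  rw [pvA_none]
  by_cases h : ((PySem.Chars.splitOn help_text.toList ['\n']).dropWhile (fun l => !pvIsHeader l)).isEmpty
  · simp only [h, if_true]
    by_cases hc : ((PySem.Chars.splitOn help_text.toList ['\n']).filter (fun l => !(PySem.Chars.strip l).isEmpty)).isEmpty <;>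
      simp [hc]
  · simp [h]
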